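-- pv_equiv track=rewrite | github.com/yaozhangPAN/youth_growth_Skill | util/youth_growth/curve_engine.py | peaks_and_troughs
-- ===== SOURCE A (Python) =====
-- from typing import Any
--
-- def peaks_and_troughs(curve: list[dict[str, Any]]) -> dict[str, list[int]]:
--     """根据 learning_focus 找相对低谷与高峰年份（演示用）。"""
--     if not curve:
--         return {"trough_years": [], "peak_years": []}
--     lf = [int(r.get("learning_focus", 3)) for r in curve]
--     years = [int(r["year"]) for r in curve]
--     mi, ma = min(lf), max(lf)
--     troughs = [years[i] for i, v in enumerate(lf) if v == mi]
--     peaks = [years[i] for i, v in enumerate(lf) if v == ma]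
--     return {"trough_years": troughs, "peak_years": peaks}
-- ===== SOURCE B (Python) =====
-- def peaks_and_troughs(curve):
--     """Single accumulating scan with running extrema instead of min/max plus two filter passes."""
--     if not curve:
--         return {"trough_years": [], "peak_years": []}
--     lf = [int(r.get("learning_focus", 3)) for r in curve]
--     years = [int(r["year"]) for r in curve]
--     mi = ma = lf[0]
--     troughs = [years[0]]
--     peaks = [years[0]]
--     for i in range(1, len(lf)):
--         v, y = lf[i], years[i]
--         if v < mi:
--             mi, troughs = v, [y]
--         elif v == mi:
--             troughs.append(y)
--         if v > ma:
--             ma, peaks = v, [y]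
--         elif v == ma:
--             peaks.append(y)
--     return {"trough_years": troughs, "peak_years": peaks}
-- ===== Notes on version B (the rewrite author's own statement) =====
-- stated objective: alternative
-- what changed: Replaces min(lf)/max(lf) plus two filtering comprehensions (three passes over lf) with one accumulating scan that maintains running minimum/maximum and resets/extends the trough/peak year lists on the fly.
import Mathlib
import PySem

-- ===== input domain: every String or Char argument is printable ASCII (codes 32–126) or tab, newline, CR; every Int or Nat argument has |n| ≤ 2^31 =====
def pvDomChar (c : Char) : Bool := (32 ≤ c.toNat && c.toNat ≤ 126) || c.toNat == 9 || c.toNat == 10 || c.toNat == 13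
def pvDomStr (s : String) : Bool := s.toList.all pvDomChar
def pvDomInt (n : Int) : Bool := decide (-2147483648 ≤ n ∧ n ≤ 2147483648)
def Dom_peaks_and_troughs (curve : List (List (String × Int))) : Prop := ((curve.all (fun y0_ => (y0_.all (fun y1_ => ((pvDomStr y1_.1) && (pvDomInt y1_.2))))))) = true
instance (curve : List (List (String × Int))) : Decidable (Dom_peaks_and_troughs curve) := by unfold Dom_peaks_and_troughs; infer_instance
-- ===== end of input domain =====

-- B replaces A's min/max + two filter passes with one accumulating scan keeping running extrema (alternative decomposition, same O(n) cost).

-- ===== PORT A =====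
def peaks_and_troughs (curve : List (List (String × Int))) : List (String × List Int) :=
  if curve = [] then [("trough_years", []), ("peak_years", [])]
  else
    let lf := curve.map (fun r => PySem.Dict.getD (PySem.Dict.mk r) "learning_focus" 3)
    -- r["year"] raises KeyError when "year" is absent: those inputs are excluded by Pre_
    let years := curve.map (fun r => ((PySem.Dict.mk r).get? "year").getD 0)
    let mi := (PySem.List.min? lf (fun x => x)).getD 0
    let ma := (PySem.List.max? lf (fun x => x)).getD 0
    let troughs := ((years.zip lf).filter (fun p => p.2 == mi)).map (fun p => p.1)
    let peaks := ((years.zip lf).filter (fun p => p.2 == ma)).map (fun p => p.1)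
    [("trough_years", troughs), ("peak_years", peaks)]

-- ===== PORT B =====
-- the for-loop of Source B: one scan over (year, lf) pairs maintaining running mi/ma and the two year lists
def ptScan : List (Int × Int) → Int → Int → List Int → List Int → List Int × List Int
  | [], _, _, tr, pk => (tr, pk)
  | (y, v) :: rest, mi, ma, tr, pk =>
    ptScan rest (if v < mi then v else mi) (if ma < v then v else ma)
      (if v < mi then [y] else if v = mi then tr ++ [y] else tr)
      (if ma < v then [y] else if v = ma then pk ++ [y] else pk)

def peaks_and_troughs_alt (curve : List (List (String × Int))) : List (String × List Int) :=
  if curve = [] then [("trough_years", []), ("peak_years", [])]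
  else
    let lf := curve.map (fun r => PySem.Dict.getD (PySem.Dict.mk r) "learning_focus" 3)
    let years := curve.map (fun r => ((PySem.Dict.mk r).get? "year").getD 0)
    match years.zip lf with
    | [] => [("trough_years", []), ("peak_years", [])]  -- unreachable: curve ≠ []
    | (y0, v0) :: rest =>
      let s := ptScan rest v0 v0 [y0] [y0]
      [("trough_years", s.1), ("peak_years", s.2)]

-- ===== PRECONDITION & SPEC =====
-- Pre_ excludes exactly the inputs where Python A raises KeyError: a record without a "year" key.
def Pre_peaks_and_troughs (curve : List (List (String × Int))) : Prop :=
  ∀ r ∈ curve, "year" ∈ r.map Prod.fst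
instance (curve : List (List (String × Int))) : Decidable (Pre_peaks_and_troughs curve) := by unfold Pre_peaks_and_troughs; infer_instance
def pvWitness_peaks_and_troughs : (List (List (String × Int))) :=
  [[("year", 1), ("learning_focus", 2)], [("year", 2)]]
def Spec_peaks_and_troughs (curve : List (List (String × Int))) (out : List (String × List Int)) : Prop := out = peaks_and_troughs_alt curve
instance (curve : List (List (String × Int))) (out : List (String × List Int)) : Decidable (Spec_peaks_and_troughs curve out) := by unfold Spec_peaks_and_troughs; infer_instance

-- ===== CLAIM (what is proved, stated in full; the proofs are below) =====
def Claim_equal_peaks_and_troughs : Prop := ∀ (curve : List (List (String × Int))), Dom_peaks_and_troughs curve → Pre_peaks_and_troughs curve → Spec_peaks_and_troughs curve (peaks_and_troughs curve)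

-- ===== LEMMAS AND PROOFS =====

theorem foldl_min_le (l : List Int) : ∀ (a : Int), l.foldl min a ≤ a := by
  induction l with
  | nil => intro a; simp
  | cons x t ih => intro a; exact le_trans (ih (min a x)) (min_le_left a x)

theorem le_foldl_max (l : List Int) : ∀ (a : Int), a ≤ l.foldl max a := by
  induction l with
  | nil => intro a; simp
  | cons x t ih => intro a; exact le_trans (le_max_left a x) (ih (max a x))

-- characterisation of the scan's trough list
theorem ptScan_fst (l : List (Int × Int)) : ∀ (mi ma : Int) (tr pk : List Int),
    (ptScan l mi ma tr pk).1 =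
      (if (l.map Prod.snd).foldl min mi = mi then tr else []) ++
      ((l.filter (fun p => p.2 == (l.map Prod.snd).foldl min mi)).map (fun p => p.1)) := by
  induction l with
  | nil => intro mi ma tr pk; simp [ptScan]
  | cons p rest ih =>
    intro mi ma tr pk
    obtain ⟨y, v⟩ := p
    rcases lt_trichotomy v mi with h1 | h1 | h1
    · have hmin : min mi v = v := by omega
      simp only [ptScan, List.map_cons, List.foldl_cons, List.filter_cons, if_pos h1, hmin, ih]
      have hle : (rest.map Prod.snd).foldl min v ≤ v := foldl_min_le _ v
      have hne : (rest.map Prod.snd).foldl min v ≠ mi := by omega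
      have hvm : v ≠ mi := by omega
      by_cases h2 : (rest.map Prod.snd).foldl min v = v
      · simp [h2, hvm]
      · have hvf : v ≠ (rest.map Prod.snd).foldl min v := fun h => h2 h.symm
        simp [h2, hne, hvf]
    · subst h1
      have hlt : ¬ v < v := lt_irrefl v
      have hmin : min v v = v := min_self v
      simp only [ptScan, List.map_cons, List.foldl_cons, List.filter_cons, if_neg hlt, hmin, ih]
      by_cases h3 : (rest.map Prod.snd).foldl min v = v
      · simp [h3]
      · have hvne : v ≠ (rest.map Prod.snd).foldl min v := fun h => h3 h.symm
        simp [h3, hvne]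
    · have hlt : ¬ v < mi := by omega
      have hne2 : v ≠ mi := by omega
      have hmin : min mi v = mi := by omega
      simp only [ptScan, List.map_cons, List.foldl_cons, List.filter_cons, if_neg hlt, if_neg hne2,
        hmin, ih]
      have hle : (rest.map Prod.snd).foldl min mi ≤ mi := foldl_min_le _ mi
      have hne : v ≠ (rest.map Prod.snd).foldl min mi := by omega
      simp [hne]

-- characterisation of the scan's peak list
theorem ptScan_snd (l : List (Int × Int)) : ∀ (mi ma : Int) (tr pk : List Int),
    (ptScan l mi ma tr pk).2 =
      (if (l.map Prod.snd).foldl max ma = ma then pk else []) ++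
      ((l.filter (fun p => p.2 == (l.map Prod.snd).foldl max ma)).map (fun p => p.1)) := by
  induction l with
  | nil => intro mi ma tr pk; simp [ptScan]
  | cons p rest ih =>
    intro mi ma tr pk
    obtain ⟨y, v⟩ := p
    rcases lt_trichotomy v ma with h1 | h1 | h1
    · have hlt : ¬ ma < v := by omega
      have hne2 : v ≠ ma := by omega
      have hmax : max ma v = ma := by omega
      simp only [ptScan, List.map_cons, List.foldl_cons, List.filter_cons, if_neg hlt, if_neg hne2,
        hmax, ih]
      have hle : ma ≤ (rest.map Prod.snd).foldl max ma := le_foldl_max _ ma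
      have hne : v ≠ (rest.map Prod.snd).foldl max ma := by omega
      simp [hne]
    · subst h1
      have hlt : ¬ v < v := lt_irrefl v
      have hmax : max v v = v := max_self v
      simp only [ptScan, List.map_cons, List.foldl_cons, List.filter_cons, if_neg hlt, hmax, ih]
      by_cases h3 : (rest.map Prod.snd).foldl max v = v
      · simp [h3]
      · have hvne : v ≠ (rest.map Prod.snd).foldl max v := fun h => h3 h.symm
        simp [h3, hvne]
    · have hgt : ma < v := h1
      have hmax : max ma v = v := by omega
      simp only [ptScan, List.map_cons, List.foldl_cons, List.filter_cons, if_pos hgt, hmax, ih]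
      have hle : v ≤ (rest.map Prod.snd).foldl max v := le_foldl_max _ v
      have hne : (rest.map Prod.snd).foldl max v ≠ ma := by omega
      have hvm : v ≠ ma := by omega
      by_cases h2 : (rest.map Prod.snd).foldl max v = v
      · simp [h2, hvm]
      · have hvf : v ≠ (rest.map Prod.snd).foldl max v := fun h => h2 h.symm
        simp [h2, hne, hvf]

-- ===== VERDICT (by name: the statement is the Claim_ definition above) =====
theorem peaks_and_troughs_spec : Claim_equal_peaks_and_troughs := by
  intro curve _ _
  unfold Spec_peaks_and_troughs peaks_and_troughs peaks_and_troughs_alt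
  cases curve with
  | nil => rfl
  | cons c cs =>
    simp only [if_neg (List.cons_ne_nil c cs), List.map_cons, List.zip_cons_cons, List.zip_map']
    rw [PySem.List.min?_id_cons, PySem.List.max?_id_cons]
    simp only [Option.getD_some]
    rw [ptScan_fst, ptScan_snd]
    have hsnd : (cs.map (fun r => (((PySem.Dict.mk r).get? "year").getD 0,
        PySem.Dict.getD (PySem.Dict.mk r) "learning_focus" 3))).map Prod.snd =
        cs.map (fun r => PySem.Dict.getD (PySem.Dict.mk r) "learning_focus" 3) := by
      simp
    rw [hsnd, List.filter_cons, List.filter_cons]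
    generalize PySem.Dict.getD (PySem.Dict.mk c) "learning_focus" 3 = v0
    generalize (cs.map (fun r => PySem.Dict.getD (PySem.Dict.mk r) "learning_focus" 3)).foldl min v0 = mi
    generalize (cs.map (fun r => PySem.Dict.getD (PySem.Dict.mk r) "learning_focus" 3)).foldl max v0 = ma
    rcases eq_or_ne v0 mi with h1 | h1 <;> rcases eq_or_ne v0 ma with h2 | h2
    · have h3 : mi = ma := h1.symm.trans h2
      simp [h1, h3]
    · have h3 : mi ≠ ma := fun h => h2 (h1.trans h)
      simp [h1, h3, h3.symm]
    · have h3 : ma ≠ mi := fun h => h1 (h2.trans h)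
      simp [h2, h3, h3.symm]
    · simp [h1, h2, h1.symm, h2.symm]
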